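-- pv_equiv track=rewrite | github.com/ruiyangio/text-analytics | common/util.py | negate_sequence
-- ===== SOURCE A (Python) =====
-- def negate_sequence(text):
--     negation = False
--     delims = "?.,!:;"
--     result = []
--     words = text.split()
--     prev = None
--     pprev = None
--     for word in words:
--         stripped = word.strip(delims).lower()
--         if not stripped:
--             continue
--         negated = "not_" + stripped if negation else stripped
--         result.append(negated)
--         if prev:
--             bigram = prev + " " + negated
--             result.append(bigram)
--             if pprev:
--                 trigram = pprev + " " + bigram
--                 result.append(trigram)
--             pprev = prev
--         prev = negated
--
--         if any(neg in word for neg in ["not", "n't", "no"]):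
--             negation = not negation
--
--         if any(c in word for c in delims):
--             negation = False
--
--     return result
-- ===== SOURCE B (Python) =====
-- def negate_sequence(text):
--     # Two-pass rewrite: pass 1 builds the negation-tagged token table,
--     # pass 2 generates uni/bi/trigrams by index.
--     delims = "?.,!:;"
--     negation = False
--     tokens = []
--     for word in text.split():
--         stripped = word.strip(delims).lower()
--         if stripped:
--             tokens.append("not_" + stripped if negation else stripped)
--             if any(neg in word for neg in ("not", "n't", "no")):
--                 negation = not negation
--             if any(c in word for c in delims):
--                 negation = False
--     out = []
--     for i, tok in enumerate(tokens):
--         out.append(tok)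
--         if i >= 1:
--             out.append(tokens[i-1] + " " + tok)
--         if i >= 2:
--             out.append(tokens[i-2] + " " + tokens[i-1] + " " + tok)
--     return out
-- ===== Notes on version B (the rewrite author's own statement) =====
-- stated objective: alternative
-- what changed: A's single loop that interleaves negation tagging with n-gram emission via prev/pprev state is split into two passes: one pass builds the negation-tagged token list, a second pass over enumerate(tokens) emits uni/bi/trigrams by index.
import Mathlib
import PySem

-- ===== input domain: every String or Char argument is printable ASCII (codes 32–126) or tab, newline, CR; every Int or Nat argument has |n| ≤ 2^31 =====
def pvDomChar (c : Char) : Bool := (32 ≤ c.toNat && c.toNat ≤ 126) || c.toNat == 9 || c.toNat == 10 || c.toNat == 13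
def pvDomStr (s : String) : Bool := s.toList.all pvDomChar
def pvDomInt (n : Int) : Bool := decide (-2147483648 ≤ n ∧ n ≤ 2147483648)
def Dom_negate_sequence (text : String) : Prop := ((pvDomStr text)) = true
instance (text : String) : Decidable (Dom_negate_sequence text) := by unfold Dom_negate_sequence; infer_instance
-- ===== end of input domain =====

-- B splits A's single pass into two: pass 1 builds the negation-tagged token table,
-- pass 2 emits uni/bi/trigrams by index (objective: alternative decomposition, same cost).


-- ===== PORT A =====
-- shared line-for-line helpers (the strip+lower and the two negation-flag updates are
-- textually identical in Source A and Source B):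
def pvStripLower (word : String) : String :=
  PySem.Str.lower (PySem.Str.stripChars word "?.,!:;")

def pvNegUpd (negation : Bool) (word : String) : Bool :=
  let negation :=
    if ["not", "n't", "no"].any (fun neg => PySem.Str.isIn neg word) then !negation else negation
  if "?.,!:;".toList.any (fun c => PySem.Str.isIn (String.ofList [c]) word) then false else negation

-- Python's prev/pprev start as None and are only truth-tested or concatenated when truthy;
-- tokens are nonempty strings, so None is represented exactly by "".
def negStepA (st : Bool × List String × String × String) (word : String) :
    Bool × List String × String × String :=
  let negation := st.1
  let result := st.2.1
  let prev := st.2.2.1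
  let pprev := st.2.2.2
  let stripped := pvStripLower word
  if stripped = "" then st else
  let negated := if negation then "not_" ++ stripped else stripped
  let result := result ++ [negated]
  let rp :=
    if prev ≠ "" then
      let bigram := prev ++ " " ++ negated
      let result := result ++ [bigram]
      let result := if pprev ≠ "" then result ++ [pprev ++ " " ++ bigram] else result
      (result, prev)
    else (result, pprev)
  (pvNegUpd negation word, rp.1, negated, rp.2)

def negate_sequence (text : String) : List String :=
  ((PySem.Str.split₀ text).foldl negStepA (false, [], "", "")).2.1

-- ===== PORT B =====
def altStep1 (st : Bool × List String) (word : String) : Bool × List String :=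
  let stripped := pvStripLower word
  if stripped = "" then st else
  (pvNegUpd st.1 word, st.2 ++ [if st.1 then "not_" ++ stripped else stripped])

-- second pass; the indices i-1, i-2 are in range whenever read, so the "" default of
-- pyGetD is never used
def altStep2 (tokens : List String) (out : List String) (p : Int × String) : List String :=
  let i := p.1
  let tok := p.2
  let out := out ++ [tok]
  let out := if 1 ≤ i then out ++ [PySem.List.pyGetD tokens (i - 1) "" ++ " " ++ tok] else out
  if 2 ≤ i then
    out ++ [PySem.List.pyGetD tokens (i - 2) "" ++ " " ++ PySem.List.pyGetD tokens (i - 1) "" ++ " " ++ tok]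
  else out

def negate_sequence_alt (text : String) : List String :=
  let tokens := ((PySem.Str.split₀ text).foldl altStep1 (false, [])).2
  (PySem.List.enumerate tokens).foldl (altStep2 tokens) []

-- ===== PRECONDITION & SPEC =====
def Spec_negate_sequence (text : String) (out : List String) : Prop := out = negate_sequence_alt text
instance (text : String) (out : List String) : Decidable (Spec_negate_sequence text out) := by unfold Spec_negate_sequence; infer_instance

-- ===== CLAIM (what is proved, stated in full; the proofs are below) =====
def Claim_equal_negate_sequence : Prop := ∀ (text : String), Dom_negate_sequence text → Spec_negate_sequence text (negate_sequence text)

-- ===== LEMMAS AND PROOFS =====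

-- the token table, as a structural recursion
def tokRec (neg : Bool) : List String → List String
  | [] => []
  | w :: ws =>
    let s := pvStripLower w
    if s = "" then tokRec neg ws
    else (if neg then "not_" ++ s else s) :: tokRec (pvNegUpd neg w) ws

-- the n-gram stream generated from context (pprev, prev), in A's emission order
def G (pp p : String) : List String → List String
  | [] => []
  | t :: ts =>
    ([t] ++ (if p ≠ "" then
        ([p ++ " " ++ t] ++ (if pp ≠ "" then [pp ++ " " ++ (p ++ " " ++ t)] else []))
      else []))
      ++ G (if p ≠ "" then p else pp) t ts

lemma not_append_ne_empty (s : String) : "not_" ++ s ≠ "" := by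
  intro h
  have := congrArg String.toList h
  simp at this

lemma mem_tokRec_ne (neg : Bool) (ws : List String) :
    ∀ t ∈ tokRec neg ws, t ≠ "" := by
  induction ws generalizing neg with
  | nil => simp [tokRec]
  | cons w ws ih =>
    intro t ht
    simp only [tokRec] at ht
    split at ht
    · exact ih neg t ht
    · rcases List.mem_cons.mp ht with h | h
      · subst h
        split
        · exact not_append_ne_empty _
        · assumption
      · exact ih _ t h

lemma foldl_altStep1 (ws : List String) :
    ∀ neg acc, (ws.foldl altStep1 (neg, acc)).2 = acc ++ tokRec neg ws := by
  induction ws with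
  | nil => intro neg acc; simp [tokRec]
  | cons w ws ih =>
    intro neg acc
    simp only [List.foldl_cons, altStep1, tokRec]
    split
    · exact ih neg acc
    · simp [ih]

lemma foldl_negStepA (ws : List String) :
    ∀ neg res p pp, (ws.foldl negStepA (neg, res, p, pp)).2.1
      = res ++ G pp p (tokRec neg ws) := by
  induction ws with
  | nil => intro neg res p pp; simp [G, tokRec]
  | cons w ws ih =>
    intro neg res p pp
    simp only [List.foldl_cons, negStepA, tokRec]
    by_cases hs : pvStripLower w = ""
    · simp only [hs]
      exact ih neg res p pp
    · simp only [hs, ite_false]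
      by_cases hp : p = ""
      · simp only [hp, ne_eq, not_true_eq_false, ite_false]
        rw [ih]
        simp [G, List.append_assoc]
      · by_cases hpp : pp = ""
        · simp only [ne_eq, hp, hpp, not_false_eq_true, if_pos, not_true_eq_false, ite_false]
          rw [ih]
          simp [G, hp, List.append_assoc]
        · simp only [ne_eq, hp, hpp, not_false_eq_true, if_pos]
          rw [ih]
          simp [G, hp, hpp, List.append_assoc]

lemma getD_append_sub_one (done rest : List String) (h : done ≠ []) :
    PySem.List.pyGetD (done ++ rest) ((done.length : Int) - 1) "" = (done.getLast?).getD "" := by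
  have h1 : (done.length : Int) - 1 = ((done.length - 1 : Nat) : Int) := by
    have : 1 ≤ done.length := List.length_pos_iff.mpr h
    omega
  rw [h1, PySem.List.pyGetD_natCast]
  have hlt : done.length - 1 < done.length := by
    have : 1 ≤ done.length := List.length_pos_iff.mpr h
    omega
  rw [List.getD_eq_getElem?_getD, List.getElem?_append_left (by omega), ← List.getLast?_eq_getElem?]

lemma getD_append_sub_two (done rest : List String) (h : 2 ≤ done.length) :
    PySem.List.pyGetD (done ++ rest) ((done.length : Int) - 2) ""
      = (done.dropLast.getLast?).getD "" := by
  have h1 : (done.length : Int) - 2 = ((done.length - 2 : Nat) : Int) := by omega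
  rw [h1, PySem.List.pyGetD_natCast]
  rw [List.getD_eq_getElem?_getD, List.getElem?_append_left (by omega)]
  rw [List.getLast?_eq_getElem?, List.length_dropLast, List.getElem?_dropLast,
    if_pos (by omega : done.length - 1 - 1 < done.length - 1)]
  have h2 : done.length - 1 - 1 = done.length - 2 := by omega
  rw [h2]

lemma getLastD_ne (done : List String) (hd : ∀ t ∈ done, t ≠ "") (h : done ≠ []) :
    (done.getLast?).getD "" ≠ "" := by
  cases hgl : done.getLast? with
  | none => exact absurd (List.getLast?_eq_none_iff.mp hgl) h
  | some a => exact hd a (List.mem_of_getLast? hgl)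

lemma foldl_altStep2 (rest : List String) :
    ∀ (done out : List String), (∀ t ∈ done, t ≠ "") → (∀ t ∈ rest, t ≠ "") →
    (PySem.List.enumerate rest (done.length : Int)).foldl (altStep2 (done ++ rest)) out
      = out ++ G ((done.dropLast.getLast?).getD "") ((done.getLast?).getD "") rest := by
  induction rest with
  | nil => intro done out _ _; simp [PySem.List.enumerate, G]
  | cons t rest ih =>
    intro done out hd hr
    have ht : t ≠ "" := hr t (List.mem_cons_self)
    have hr' : ∀ x ∈ rest, x ≠ "" := fun x hx => hr x (List.mem_cons_of_mem _ hx)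
    have hd' : ∀ x ∈ done ++ [t], x ≠ "" := by
      intro x hx
      rcases List.mem_append.mp hx with h | h
      · exact hd x h
      · rw [List.mem_singleton.mp h]; exact ht
    have happ : (done ++ [t]) ++ rest = done ++ t :: rest := by simp
    have hstart : (done.length : Int) + 1 = (((done ++ [t]).length : Nat) : Int) := by
      simp
    rw [PySem.List.enumerate_cons, List.foldl_cons, hstart]
    have hih := ih (done ++ [t]) (altStep2 (done ++ t :: rest) out ((done.length : Int), t)) hd' hr'
    rw [happ] at hih
    rw [hih, List.dropLast_concat, List.getLast?_concat]
    by_cases h0 : done = []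
    · subst h0
      simp [altStep2, G]
    · have hlen : 1 ≤ done.length := List.length_pos_iff.mpr h0
      have hp : (done.getLast?).getD "" ≠ "" := getLastD_ne done hd h0
      have c1 : (1 : Int) ≤ (done.length : Int) := by exact_mod_cast hlen
      by_cases h2 : 2 ≤ done.length
      · have hpp : (done.dropLast.getLast?).getD "" ≠ "" := by
          apply getLastD_ne
          · exact fun x hx => hd x (List.dropLast_subset _ hx)
          · intro hnil
            have := congrArg List.length hnil
            simp [List.length_dropLast] at this
            omega
        have c2 : (2 : Int) ≤ (done.length : Int) := by exact_mod_cast h2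
        simp only [altStep2]
        rw [if_pos c2, if_pos c1]
        rw [getD_append_sub_one done (t :: rest) h0, getD_append_sub_two done (t :: rest) h2]
        simp only [G, Option.getD_some, ne_eq, hp, hpp, not_false_eq_true, if_pos]
        simp [List.append_assoc, String.append_assoc]
      · have hone : done.length = 1 := by omega
        have hpp : (done.dropLast.getLast?).getD "" = "" := by
          have hnil : done.dropLast = [] := by
            apply List.length_eq_zero_iff.mp
            simp [List.length_dropLast, hone]
          simp [hnil]
        have c2 : ¬ (2 : Int) ≤ (done.length : Int) := by exact_mod_cast h2
        simp only [altStep2]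
        rw [if_neg c2, if_pos c1]
        rw [getD_append_sub_one done (t :: rest) h0]
        simp only [G, Option.getD_some, ne_eq, hp, hpp, not_false_eq_true, if_pos,
          not_true_eq_false, ite_false]
        simp [List.append_assoc]

-- ===== VERDICT (by name: the statement is the Claim_ definition above) =====
theorem negate_sequence_spec : Claim_equal_negate_sequence := by
  intro text _
  unfold Spec_negate_sequence negate_sequence negate_sequence_alt
  rw [foldl_negStepA, foldl_altStep1]
  have h := foldl_altStep2 (tokRec false (PySem.Str.split₀ text)) [] []
    (by simp) (mem_tokRec_ne false _)
  simpa using h.symm
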